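-- pv_equiv track=rewrite | github.com/KonstantinS007/PythonProject | Practice_15/practika15_1.py | most_length
-- ===== SOURCE A (Python) =====
-- def most_length(text):
--     """
--     Функция принимает список.
--     Возвращает самый длинный элемент.
--     Если есть несколько элементов с одинаковой самой большой длиной, то вернёт их все.
--     """
--
--     most_length1 = []
--     qty_most_length = 0
--     alphabet = r'abcdefghijklmnopqrstuvwxyz`ABCDEFGHIJKLMNOPQRSTUVWXYZ'
--     for item in text:
--         for char in item:
--             if char not in alphabet:
--                 char_en = False
--             else:
--                 char_en = True
--
--             if char_en:
--                 qty = len(item)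
--                 if qty > qty_most_length:
--                     qty_most_length = qty
--                     most_length1 = [item]
--                 elif qty == qty_most_length:
--                     most_length1.append(item)
--
--     return list(set(most_length1))
-- ===== SOURCE B (Python) =====
-- def most_length(text):
--     """
--     Функция принимает список.
--     Возвращает самый длинный элемент.
--     Если есть несколько элементов с одинаковой самой большой длиной, то вернёт их все.
--     """
--     alphabet = r'abcdefghijklmnopqrstuvwxyz`ABCDEFGHIJKLMNOPQRSTUVWXYZ'
--     qualifying = [item for item in text if any(c in alphabet for c in item)]
--     m = 0
--     for item in qualifying:
--         if len(item) > m: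
--             m = len(item)
--     return list(set(item for item in qualifying if len(item) == m))
-- ===== Notes on version B (the rewrite author's own statement) =====
-- stated objective: simpler
-- what changed: Replaces A's interleaved per-character max-tracking (which re-runs the length comparison and list update once for every letter of every item) with a plain two-pass decomposition: filter the items containing a letter, take the max length, filter by that length, dedup via set.
import Mathlib
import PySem

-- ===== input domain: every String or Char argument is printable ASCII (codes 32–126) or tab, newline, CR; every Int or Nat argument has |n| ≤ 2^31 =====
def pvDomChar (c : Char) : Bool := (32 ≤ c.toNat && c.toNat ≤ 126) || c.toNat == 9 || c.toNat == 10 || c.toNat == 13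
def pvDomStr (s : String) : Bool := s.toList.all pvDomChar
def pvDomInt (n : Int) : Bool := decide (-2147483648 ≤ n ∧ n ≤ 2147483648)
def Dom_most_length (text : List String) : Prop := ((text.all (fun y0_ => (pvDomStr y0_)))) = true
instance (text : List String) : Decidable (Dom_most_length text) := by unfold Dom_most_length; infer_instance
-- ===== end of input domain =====

-- B replaces A's interleaved per-letter max-tracking by a plain filter / max / filter decomposition (objective: simpler, not faster).

-- ===== PORT A =====
-- the alphabet string of A (iterated only for single-char membership, so a List Char is exact)
def pvAlphabet : List Char := "abcdefghijklmnopqrstuvwxyz`ABCDEFGHIJKLMNOPQRSTUVWXYZ".toList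

-- the body of A's inner 'for char in item' loop, acting on the state (most_length1, qty_most_length)
def mlStep (item : String) (st : List String × Int) (c : Char) : List String × Int :=
  -- 'char not in alphabet' for a single char is exactly char membership in the alphabet
  let char_en := if pvAlphabet.contains c = false then false else true
  if char_en then
    let qty := PySem.Str.len item
    if qty > st.2 then ([item], qty)
    else if qty = st.2 then (st.1 ++ [item], st.2)
    else st
  else st

def most_length (text : List String) : List String :=
  let st := text.foldl (fun st item => item.toList.foldl (mlStep item) st) ([], (0 : Int))
  PySem.Set.ofList st.1

-- ===== PORT B =====
-- 'any(c in alphabet for c in item)'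
def pvHasAlpha (s : String) : Bool := s.toList.any (fun c => pvAlphabet.contains c)

def most_length_alt (text : List String) : List String :=
  let qualifying := text.filter pvHasAlpha
  let m := qualifying.foldl (fun m item => if PySem.Str.len item > m then PySem.Str.len item else m) (0 : Int)
  PySem.Set.ofList (qualifying.filter (fun item => PySem.Str.len item == m))

-- ===== PRECONDITION & SPEC =====
def Spec_most_length (text : List String) (out : List String) : Prop := out = most_length_alt text
instance (text : List String) (out : List String) : Decidable (Spec_most_length text out) := by unfold Spec_most_length; infer_instance

-- ===== CLAIM (what is proved, stated in full; the proofs are below) =====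
def Claim_equal_most_length : Prop := ∀ (text : List String), Dom_most_length text → Spec_most_length text (most_length text)

-- ===== LEMMAS AND PROOFS =====

-- the max length among the qualifying items (0 when there are none)
def pvMx (t : List String) : Int :=
  (t.filter pvHasAlpha).foldl (fun a i => max a (PySem.Str.len i)) 0

theorem pv_ofList_append_singleton {α : Type} [BEq α] (ys : List α) (x : α) :
    PySem.Set.ofList (ys ++ [x]) = PySem.Set.add (PySem.Set.ofList ys) x := by
  simp [PySem.Set.ofList_eq_foldl, List.foldl_append]

theorem pv_add_add_self {α : Type} [BEq α] [LawfulBEq α] (s : PySem.Set α) (x : α) :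
    PySem.Set.add (PySem.Set.add s x) x = PySem.Set.add s x := by
  by_cases h : x ∈ s <;> simp_all [PySem.Set.add]

theorem pv_ofList_singleton {α : Type} [BEq α] (x : α) :
    PySem.Set.ofList [x] = [x] := by
  simp [PySem.Set.ofList_eq_foldl, PySem.Set.add]

-- effect of A's inner loop when the item contains no alphabet char: the state is unchanged
theorem pv_inner_no (item : String) (cs : List Char)
    (h : cs.any (fun c => pvAlphabet.contains c) = false) (st : List String × Int) :
    cs.foldl (mlStep item) st = st := by
  induction cs with
  | nil => rfl
  | cons c cs ih =>
    simp only [List.any_cons, Bool.or_eq_false_iff] at h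
    have hcm : c ∉ pvAlphabet := by simpa using h.1
    rw [List.foldl_cons, show mlStep item st c = st from by simp [mlStep, hcm], ih h.2]

-- effect of A's inner loop when the item contains an alphabet char, up to set-of-list
theorem pv_inner_yes (item : String) (cs : List Char)
    (h : cs.any (fun c => pvAlphabet.contains c) = true) (L : List String) (M : Int) :
    ∃ L', cs.foldl (mlStep item) (L, M) = (L', max M (PySem.Str.len item)) ∧
      PySem.Set.ofList L' =
        (if M < PySem.Str.len item then [item]
         else if PySem.Str.len item = M then PySem.Set.add (PySem.Set.ofList L) item
         else PySem.Set.ofList L) := by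
  induction cs generalizing L M with
  | nil => simp at h
  | cons c cs ih =>
    by_cases hc : pvAlphabet.contains c = true
    · have hstep : mlStep item (L, M) c =
          (if M < PySem.Str.len item then ([item], PySem.Str.len item)
           else if PySem.Str.len item = M then (L ++ [item], M) else (L, M)) := by
        simp [mlStep, show c ∈ pvAlphabet from by simpa using hc]
      by_cases hcs : cs.any (fun c => pvAlphabet.contains c) = true
      · rcases lt_trichotomy M (PySem.Str.len item) with h1 | h1 | h1
        · obtain ⟨L', hfold, hset⟩ := ih hcs [item] (PySem.Str.len item)
          refine ⟨L', ?_, ?_⟩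
          · rw [List.foldl_cons, hstep, if_pos h1, hfold,
              show max (PySem.Str.len item) (PySem.Str.len item) = max M (PySem.Str.len item) from by omega]
          · rw [hset, if_neg (lt_irrefl _), if_pos rfl, pv_ofList_singleton, if_pos h1]
            simp [PySem.Set.add]
        · obtain ⟨L', hfold, hset⟩ := ih hcs (L ++ [item]) M
          refine ⟨L', ?_, ?_⟩
          · rw [List.foldl_cons, hstep, if_neg (by omega), if_pos (show PySem.Str.len item = M from by omega), hfold]
          · rw [hset, if_neg (by omega), if_pos (show PySem.Str.len item = M from by omega),
              if_neg (by omega), if_pos (show PySem.Str.len item = M from by omega),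
              pv_ofList_append_singleton, pv_add_add_self]
        · obtain ⟨L', hfold, hset⟩ := ih hcs L M
          refine ⟨L', ?_, ?_⟩
          · rw [List.foldl_cons, hstep, if_neg (by omega), if_neg (by omega), hfold]
          · rw [hset]
      · have hcs' : cs.any (fun c => pvAlphabet.contains c) = false := by simpa using hcs
        rcases lt_trichotomy M (PySem.Str.len item) with h1 | h1 | h1
        · refine ⟨[item], ?_, ?_⟩
          · rw [List.foldl_cons, hstep, if_pos h1, pv_inner_no item cs hcs',
              show max M (PySem.Str.len item) = PySem.Str.len item from by omega]
          · rw [if_pos h1, pv_ofList_singleton]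
        · refine ⟨L ++ [item], ?_, ?_⟩
          · rw [List.foldl_cons, hstep, if_neg (by omega),
              if_pos (show PySem.Str.len item = M from by omega), pv_inner_no item cs hcs',
              show max M (PySem.Str.len item) = M from by omega]
          · rw [if_neg (by omega), if_pos (show PySem.Str.len item = M from by omega),
              pv_ofList_append_singleton]
        · refine ⟨L, ?_, ?_⟩
          · rw [List.foldl_cons, hstep, if_neg (by omega), if_neg (by omega),
              pv_inner_no item cs hcs',
              show max M (PySem.Str.len item) = M from by omega]
          · rw [if_neg (by omega), if_neg (by omega)]
    · have hc' : pvAlphabet.contains c = false := by simpa using hc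
      have h2 : cs.any (fun c => pvAlphabet.contains c) = true := by
        simp only [List.any_cons, hc', Bool.false_or] at h
        exact h
      obtain ⟨L', hfold, hset⟩ := ih h2 L M
      exact ⟨L', by rw [List.foldl_cons, show mlStep item (L, M) c = (L, M) from by simp [mlStep, show c ∉ pvAlphabet from by simpa using hc'], hfold], hset⟩

-- invariant of A's outer loop
theorem pv_outer (t : List String) :
    (t.foldl (fun st item => item.toList.foldl (mlStep item) st) ([], (0 : Int))).2 = pvMx t ∧
    PySem.Set.ofList (t.foldl (fun st item => item.toList.foldl (mlStep item) st) ([], (0 : Int))).1 =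
      PySem.Set.ofList ((t.filter pvHasAlpha).filter (fun i => PySem.Str.len i == pvMx t)) := by
  induction t using List.reverseRecOn with
  | nil => exact ⟨rfl, rfl⟩
  | append_singleton t x ih =>
    obtain ⟨ihM, ihL⟩ := ih
    have hbound : ∀ i ∈ t.filter pvHasAlpha, PySem.Str.len i ≤ pvMx t :=
      (PySem.List.le_foldl_max_int (t.filter pvHasAlpha) PySem.Str.len 0).2
    by_cases hq : pvHasAlpha x = true
    · have hmx : pvMx (t ++ [x]) = max (pvMx t) (PySem.Str.len x) := by
        simp [pvMx, List.filter_append, hq, List.foldl_append]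
      have hflt : (t ++ [x]).filter pvHasAlpha = t.filter pvHasAlpha ++ [x] := by
        simp [List.filter_append, hq]
      obtain ⟨L', hfold, hset⟩ :=
        pv_inner_yes x x.toList (by simpa [pvHasAlpha] using hq)
          (t.foldl (fun st item => item.toList.foldl (mlStep item) st) ([], (0 : Int))).1
          (t.foldl (fun st item => item.toList.foldl (mlStep item) st) ([], (0 : Int))).2
      rw [ihM] at hset
      have hout : (t ++ [x]).foldl (fun st item => item.toList.foldl (mlStep item) st) ([], (0 : Int)) =
          (L', max (pvMx t) (PySem.Str.len x)) := by
        rw [List.foldl_append, List.foldl_cons, List.foldl_nil, hfold, ihM]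
      rw [hout, hmx, hflt]
      refine ⟨rfl, ?_⟩
      rcases lt_trichotomy (pvMx t) (PySem.Str.len x) with h1 | h1 | h1
      · have hnone : (t.filter pvHasAlpha).filter
            (fun i => PySem.Str.len i == PySem.Str.len x) = [] := by
          rw [List.filter_eq_nil_iff]
          intro i hi
          have hb := hbound i hi
          simp only [beq_iff_eq]
          omega
        rw [show max (pvMx t) (PySem.Str.len x) = PySem.Str.len x from by omega,
          List.filter_append, hnone, List.nil_append, hset, if_pos h1,
          show List.filter (fun i => PySem.Str.len i == PySem.Str.len x) [x] = [x] from by simp,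
          pv_ofList_singleton]
      · rw [show max (pvMx t) (PySem.Str.len x) = pvMx t from by omega,
          List.filter_append,
          show List.filter (fun i => PySem.Str.len i == pvMx t) [x] = [x] from by
            rw [List.filter_singleton,
              show (PySem.Str.len x == pvMx t) = true from by simp only [beq_iff_eq]; omega,
              cond_true],
          hset, if_neg (by omega), if_pos (show PySem.Str.len x = pvMx t from by omega),
          pv_ofList_append_singleton, ihL]
      · rw [show max (pvMx t) (PySem.Str.len x) = pvMx t from by omega,
          List.filter_append,
          show List.filter (fun i => PySem.Str.len i == pvMx t) [x] = [] from by
            rw [List.filter_singleton,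
              show (PySem.Str.len x == pvMx t) = false from by
                simp only [beq_eq_false_iff_ne, ne_eq]; omega,
              cond_false],
          List.append_nil, hset, if_neg (by omega), if_neg (by omega), ihL]
    · have hq' : pvHasAlpha x = false := by simpa using hq
      have hmx : pvMx (t ++ [x]) = pvMx t := by
        simp [pvMx, List.filter_append, hq']
      have hflt : (t ++ [x]).filter pvHasAlpha = t.filter pvHasAlpha := by
        simp [List.filter_append, hq']
      have hout : (t ++ [x]).foldl (fun st item => item.toList.foldl (mlStep item) st) ([], (0 : Int)) =
          t.foldl (fun st item => item.toList.foldl (mlStep item) st) ([], (0 : Int)) := by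
        rw [List.foldl_append, List.foldl_cons, List.foldl_nil,
          pv_inner_no x x.toList (by simpa [pvHasAlpha] using hq')]
      rw [hout, hmx, hflt]
      exact ⟨ihM, ihL⟩

-- B's running-max-by-if loop is the fold of max
theorem pv_mB (t : List String) :
    (t.filter pvHasAlpha).foldl
      (fun m item => if PySem.Str.len item > m then PySem.Str.len item else m) (0 : Int) = pvMx t := by
  unfold pvMx
  apply PySem.List.foldl_congr_mem
  intro acc x _
  rcases lt_trichotomy acc (PySem.Str.len x) with h | h | h
  · rw [if_pos (by omega), max_eq_right (le_of_lt h)]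
  · rw [if_neg (by omega), max_eq_left (by omega)]
  · rw [if_neg (by omega), max_eq_left (by omega)]

-- ===== VERDICT (by name: the statement is the Claim_ definition above) =====
theorem most_length_spec : Claim_equal_most_length := by
  intro text _
  show most_length text = most_length_alt text
  unfold most_length most_length_alt
  simp only [pv_mB]
  exact (pv_outer text).2
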